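-- pv_equiv track=rewrite | github.com/weikunhan/leetcode-summary-python | practice/tusimple/matrix_conversion.py | matrix_conversion
-- ===== SOURCE A (Python) =====
-- def matrix_conversion(matrix):
--     """
--     :type matrix: List[List[int]]
--     :rtype: List[List[int]]
--     """
--
--     dp_list = matrix
--     row_end = 0
--     col_end = 0
--     res = []
--
--     if dp_list:
--         row_end = len(dp_list)
--         col_end = len(dp_list[0])
--     else:
--
--         return res
--
--     for i in reversed(range(1, row_end)):
--         for j in reversed(range(1, col_end)):
--             dp_list[i][j] = dp_list[i][j] - dp_list[i][j - 1] - dp_list[i - 1][j] + dp_list[i - 1][j - 1]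
--
--     for i in reversed(range(1, row_end)):
--         dp_list[i][0] -= dp_list[i - 1][0]
--
--     for i in reversed(range(1, col_end)):
--         dp_list[0][i] -= dp_list[0][i - 1]
--
--     res = dp_list
--
--     return res
-- ===== SOURCE B (Python) =====
-- # B: non-mutating closed-form rewrite -- builds a fresh matrix in one pass,
-- # each cell computed directly from the ORIGINAL prefix-sum values (no reversed
-- # in-place passes needed).  Return value equals A's; unlike A it does not
-- # mutate the argument.
-- def matrix_conversion(matrix):
--     if not matrix:
--         return []
--     w = len(matrix[0])
--     return [[v
--              - (row[j - 1] if 0 < j < w else 0)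
--              - (matrix[i - 1][j] if 0 < i and j < w else 0)
--              + (matrix[i - 1][j - 1] if 0 < i and 0 < j < w else 0)
--              for j, v in enumerate(row)]
--             for i, row in enumerate(matrix)]
-- ===== Notes on version B (the rewrite author's own statement) =====
-- stated objective: simpler
-- what changed: A does three separate reversed in-place mutation passes (interior, first column, first row); B builds a fresh matrix in a single comprehension, computing every cell in closed form from the original prefix-sum values with out-of-range neighbours treated as 0 (return value only: B does not mutate its argument).
import Mathlib
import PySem

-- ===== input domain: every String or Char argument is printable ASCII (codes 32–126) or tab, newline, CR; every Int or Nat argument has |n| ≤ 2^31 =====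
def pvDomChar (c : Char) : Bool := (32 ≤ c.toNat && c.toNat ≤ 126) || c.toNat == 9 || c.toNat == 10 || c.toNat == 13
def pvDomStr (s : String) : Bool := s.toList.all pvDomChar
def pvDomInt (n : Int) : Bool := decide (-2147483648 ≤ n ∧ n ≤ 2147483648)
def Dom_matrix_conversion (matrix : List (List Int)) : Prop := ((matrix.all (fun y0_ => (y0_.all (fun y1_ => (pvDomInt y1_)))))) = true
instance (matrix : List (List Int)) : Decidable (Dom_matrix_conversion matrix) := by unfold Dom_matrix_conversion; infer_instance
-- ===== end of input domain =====

-- B replaces A's three reversed in-place passes by one closed-form rebuild of the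
-- matrix (simpler); equivalence is about the RETURN value only: A mutates its
-- argument in place, B does not.

-- ===== PORT A =====
-- in-range 2D read/write helpers (Python dp_list[i][j]; exact for the in-range
-- nonnegative indices A's loops use on inputs admitted by Pre_)
def pvG (m : List (List Int)) (i j : Nat) : Int := (m.getD i []).getD j 0
def pvS (m : List (List Int)) (i j : Nat) (v : Int) : List (List Int) :=
  m.set i ((m.getD i []).set j v)
-- body of the inner statement of A's first double loop
def pvStep1 (i : Nat) (dp : List (List Int)) (j : Nat) : List (List Int) :=
  pvS dp i j (pvG dp i j - pvG dp i (j-1) - pvG dp (i-1) j + pvG dp (i-1) (j-1))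
-- 'for j in reversed(range(1, colEnd)):'   ((List.range' 1 n).reverse = [n, …, 1])
def pvInner (dp : List (List Int)) (i n : Nat) : List (List Int) :=
  (List.range' 1 n).reverse.foldl (pvStep1 i) dp
-- 'for i in reversed(range(1, rowEnd)):' around the inner loop
def pvOuter (dp : List (List Int)) (m n : Nat) : List (List Int) :=
  (List.range' 1 m).reverse.foldl (fun dp i => pvInner dp i n) dp
-- second pass: 'dp_list[i][0] -= dp_list[i-1][0]'
def pvStep2 (dp : List (List Int)) (i : Nat) : List (List Int) :=
  pvS dp i 0 (pvG dp i 0 - pvG dp (i-1) 0)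
def pvPass2 (dp : List (List Int)) (m : Nat) : List (List Int) :=
  (List.range' 1 m).reverse.foldl pvStep2 dp
-- third pass: 'dp_list[0][i] -= dp_list[0][i-1]'
def pvStep3 (dp : List (List Int)) (j : Nat) : List (List Int) :=
  pvS dp 0 j (pvG dp 0 j - pvG dp 0 (j-1))
def pvPass3 (dp : List (List Int)) (n : Nat) : List (List Int) :=
  (List.range' 1 n).reverse.foldl pvStep3 dp

def matrix_conversion (matrix : List (List Int)) : List (List Int) :=
  if matrix.isEmpty then []
  else
    let rowEnd := matrix.length
    let colEnd := (matrix.headD []).length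
    pvPass3 (pvPass2 (pvOuter matrix (rowEnd - 1) (colEnd - 1)) (rowEnd - 1)) (colEnd - 1)

-- ===== PORT B =====
-- list comprehensions over enumerate; the guarded neighbour reads are in range
-- whenever their guard holds, so pyGetD is exact there
def matrix_conversion_alt (matrix : List (List Int)) : List (List Int) :=
  if matrix.isEmpty then []
  else
    let w : Int := ((matrix.headD []).length : Int)
    (PySem.List.enumerate matrix 0).map (fun p =>
      (PySem.List.enumerate p.2 0).map (fun q =>
        q.2
        - (if 0 < q.1 ∧ q.1 < w then PySem.List.pyGetD p.2 (q.1 - 1) 0 else 0)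
        - (if 0 < p.1 ∧ q.1 < w then PySem.List.pyGetD (PySem.List.pyGetD matrix (p.1 - 1) []) q.1 0 else 0)
        + (if 0 < p.1 ∧ 0 < q.1 ∧ q.1 < w then PySem.List.pyGetD (PySem.List.pyGetD matrix (p.1 - 1) []) (q.1 - 1) 0 else 0)))

-- ===== PRECONDITION & SPEC =====
-- Pre_ excludes exactly the inputs on which A raises IndexError: a row shorter
-- than the first row, or more than one row with an empty first row (the second
-- pass then reads column 0 of a too-short row).
def Pre_matrix_conversion (matrix : List (List Int)) : Prop :=
  (∀ row ∈ matrix, (matrix.headD []).length ≤ row.length) ∧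
  (matrix.length ≤ 1 ∨ 1 ≤ (matrix.headD []).length)
instance (matrix : List (List Int)) : Decidable (Pre_matrix_conversion matrix) := by
  unfold Pre_matrix_conversion; infer_instance
def pvWitness_matrix_conversion : List (List Int) := [[1, 2], [3, 4]]
def Spec_matrix_conversion (matrix : List (List Int)) (out : List (List Int)) : Prop := out = matrix_conversion_alt matrix
instance (matrix : List (List Int)) (out : List (List Int)) : Decidable (Spec_matrix_conversion matrix out) := by unfold Spec_matrix_conversion; infer_instance

-- ===== CLAIM (what is proved, stated in full; the proofs are below) =====
def Claim_equal_matrix_conversion : Prop := ∀ (matrix : List (List Int)), Dom_matrix_conversion matrix → Pre_matrix_conversion matrix → Spec_matrix_conversion matrix (matrix_conversion matrix)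

-- ===== LEMMAS AND PROOFS =====

-- the closed-form cell value both programs compute for the interior
def pvF (m : List (List Int)) (i j : Nat) : Int :=
  pvG m i j - pvG m i (j-1) - pvG m (i-1) j + pvG m (i-1) (j-1)

theorem length_pvS (m : List (List Int)) (i j : Nat) (v : Int) :
    (pvS m i j v).length = m.length := by simp [pvS]

theorem pvG_pvS (m : List (List Int)) (i j : Nat) (v : Int) (i' j' : Nat)
    (hi : i < m.length) (hj : j < (m.getD i []).length) :
    pvG (pvS m i j v) i' j' = if i' = i ∧ j' = j then v else pvG m i' j' := by
  unfold pvG pvS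
  simp only [List.getD_eq_getElem?_getD] at *
  by_cases h : i' = i
  · subst h
    rw [List.getElem?_set_self hi]
    by_cases h2 : j' = j
    · subst h2
      simp only [Option.getD_some]
      rw [List.getElem?_set_self hj]
      simp
    · simp only [Option.getD_some,
        List.getElem?_set_ne (fun hc => h2 hc.symm)]
      rw [if_neg (fun hc => h2 hc.2)]
  · rw [List.getElem?_set_ne (fun hc => h hc.symm),
      if_neg (fun hc => h hc.1)]

theorem rowlen_pvS (m : List (List Int)) (i j : Nat) (v : Int) (k : Nat) :
    ((pvS m i j v).getD k []).length = ((m.getD k []).length) := by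
  unfold pvS
  simp only [List.getD_eq_getElem?_getD]
  by_cases h : k = i
  · subst h
    by_cases hl : k < m.length
    · rw [List.getElem?_set_self hl]
      simp
    · rw [List.getElem?_eq_none (by simpa using hl),
        List.getElem?_eq_none (by omega)]
  · rw [List.getElem?_set_ne (fun hc => h hc.symm)]

theorem range'_reverse_succ (n : Nat) :
    (List.range' 1 (n+1)).reverse = (n+1) :: (List.range' 1 n).reverse := by
  rw [List.range'_1_concat]
  simp [Nat.add_comm]

theorem foldl_preserve {α β : Type} (P : α → Prop) (f : α → β → α)
    (h : ∀ a b, P a → P (f a b)) : ∀ (l : List β) (a : α), P a → P (l.foldl f a) := by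
  intro l
  induction l with
  | nil => intro a ha; exact ha
  | cons x xs ih => intro a ha; exact ih _ (h a x ha)

-- length and all row lengths preserved
def pvShape (m dp : List (List Int)) : Prop :=
  dp.length = m.length ∧ ∀ k, ((dp.getD k []).length) = ((m.getD k []).length)

theorem pvShape_pvS (m dp : List (List Int)) (i j : Nat) (v : Int)
    (h : pvShape m dp) : pvShape m (pvS dp i j v) :=
  ⟨by rw [length_pvS]; exact h.1, fun k => by rw [rowlen_pvS]; exact h.2 k⟩

theorem pvShape_inner (m dp : List (List Int)) (i n : Nat) (h : pvShape m dp) :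
    pvShape m (pvInner dp i n) :=
  foldl_preserve (pvShape m) _ (fun a b ha => pvShape_pvS m a i b _ ha) _ dp h

theorem pvShape_outer (m dp : List (List Int)) (mm n : Nat) (h : pvShape m dp) :
    pvShape m (pvOuter dp mm n) :=
  foldl_preserve (pvShape m) _ (fun a b ha => pvShape_inner m a b n ha) _ dp h

theorem pvShape_pass2 (m dp : List (List Int)) (mm : Nat) (h : pvShape m dp) :
    pvShape m (pvPass2 dp mm) :=
  foldl_preserve (pvShape m) _ (fun a b ha => pvShape_pvS m a b 0 _ ha) _ dp h

theorem pvShape_pass3 (m dp : List (List Int)) (n : Nat) (h : pvShape m dp) :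
    pvShape m (pvPass3 dp n) :=
  foldl_preserve (pvShape m) _ (fun a b ha => pvShape_pvS m a 0 b _ ha) _ dp h

theorem inner_char (i : Nat) : ∀ (n : Nat) (dp : List (List Int)),
    i < dp.length → n < (dp.getD i []).length → ∀ i' j',
    pvG (pvInner dp i n) i' j' =
      if i' = i ∧ 1 ≤ j' ∧ j' ≤ n then pvF dp i j' else pvG dp i' j' := by
  intro n
  induction n with
  | zero =>
    intro dp _ _ i' j'
    rw [if_neg (by omega)]
    rfl
  | succ n ih =>
    intro dp hi hn i' j'
    have hstep : pvInner dp i (n+1) = pvInner (pvStep1 i dp (n+1)) i n := by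
      unfold pvInner
      rw [range'_reverse_succ]
      rfl
    have hval : pvStep1 i dp (n+1) = pvS dp i (n+1) (pvF dp i (n+1)) := rfl
    set dp1 := pvStep1 i dp (n+1) with hdp1
    have hrow1 : ∀ k, ((dp1.getD k []).length) = ((dp.getD k []).length) := by
      intro k; rw [hval]; exact rowlen_pvS ..
    have hG1 : ∀ a b, pvG dp1 a b = if a = i ∧ b = n+1 then pvF dp i (n+1) else pvG dp a b := by
      intro a b; rw [hval]; exact pvG_pvS dp i (n+1) _ a b hi hn
    rw [hstep, ih dp1 (by rw [hval, length_pvS]; omega) (by rw [hrow1]; omega) i' j']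
    by_cases hc : i' = i ∧ 1 ≤ j' ∧ j' ≤ n+1
    · rw [if_pos hc]
      by_cases hj : j' ≤ n
      · rw [if_pos ⟨hc.1, hc.2.1, hj⟩]
        unfold pvF
        rw [hG1, hG1, hG1, hG1]
        rw [if_neg (by omega), if_neg (by omega), if_neg (by omega), if_neg (by omega)]
      · have hj' : j' = n+1 := by omega
        rw [if_neg (by omega), hG1, if_pos ⟨hc.1, hj'⟩, hj']
    · rw [if_neg hc]
      rw [if_neg (by intro h; exact hc ⟨h.1, h.2.1, by omega⟩)]
      rw [hG1, if_neg (by intro h; exact hc ⟨h.1, by omega, by omega⟩)]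

theorem outer_char : ∀ (m : Nat) (dp : List (List Int)) (n : Nat),
    m < dp.length → (∀ k, k < dp.length → n < (dp.getD k []).length) → ∀ i' j',
    pvG (pvOuter dp m n) i' j' =
      if 1 ≤ i' ∧ i' ≤ m ∧ 1 ≤ j' ∧ j' ≤ n then pvF dp i' j' else pvG dp i' j' := by
  intro m
  induction m with
  | zero =>
    intro dp n _ _ i' j'
    rw [if_neg (by omega)]
    rfl
  | succ m ih =>
    intro dp n hm hrows i' j'
    have hstep : pvOuter dp (m+1) n = pvOuter (pvInner dp (m+1) n) m n := by
      unfold pvOuter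
      rw [range'_reverse_succ]
      rfl
    set dp1 := pvInner dp (m+1) n with hdp1
    have hsh : pvShape dp dp1 := pvShape_inner dp dp (m+1) n ⟨rfl, fun _ => rfl⟩
    have hG1 : ∀ a b, pvG dp1 a b =
        if a = m+1 ∧ 1 ≤ b ∧ b ≤ n then pvF dp (m+1) b else pvG dp a b := by
      intro a b
      exact inner_char (m+1) n dp (by omega) (hrows (m+1) (by omega)) a b
    rw [hstep, ih dp1 n (by rw [hsh.1]; omega)
      (fun k hk => by rw [hsh.2]; exact hrows k (by rw [← hsh.1]; omega)) i' j']
    by_cases hc : 1 ≤ i' ∧ i' ≤ m+1 ∧ 1 ≤ j' ∧ j' ≤ n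
    · rw [if_pos hc]
      by_cases hi : i' ≤ m
      · rw [if_pos ⟨hc.1, hi, hc.2.2⟩]
        unfold pvF
        rw [hG1, hG1, hG1, hG1]
        rw [if_neg (by omega), if_neg (by omega), if_neg (by omega), if_neg (by omega)]
      · have hi' : i' = m+1 := by omega
        rw [if_neg (by omega), hG1, if_pos ⟨hi', hc.2.2⟩, hi']
    · rw [if_neg hc, if_neg (by intro h; exact hc ⟨h.1, by omega, h.2.2⟩),
        hG1, if_neg (by intro h; exact hc ⟨by omega, by omega, h.2⟩)]

theorem pass2_char : ∀ (m : Nat) (dp : List (List Int)),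
    m < dp.length → (∀ k, k < dp.length → 0 < (dp.getD k []).length) → ∀ i' j',
    pvG (pvPass2 dp m) i' j' =
      if 1 ≤ i' ∧ i' ≤ m ∧ j' = 0 then pvG dp i' 0 - pvG dp (i'-1) 0 else pvG dp i' j' := by
  intro m
  induction m with
  | zero =>
    intro dp _ _ i' j'
    rw [if_neg (by omega)]
    rfl
  | succ m ih =>
    intro dp hm hrows i' j'
    have hstep : pvPass2 dp (m+1) = pvPass2 (pvStep2 dp (m+1)) m := by
      unfold pvPass2
      rw [range'_reverse_succ]
      rfl
    set dp1 := pvStep2 dp (m+1) with hdp1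
    have hrow1 : ∀ k, ((dp1.getD k []).length) = ((dp.getD k []).length) := by
      intro k; rw [hdp1, pvStep2, rowlen_pvS]
    have hG1 : ∀ a b, pvG dp1 a b =
        if a = m+1 ∧ b = 0 then pvG dp (m+1) 0 - pvG dp m 0 else pvG dp a b := by
      intro a b
      rw [hdp1, pvStep2]
      exact pvG_pvS dp (m+1) 0 _ a b (by omega) (hrows (m+1) (by omega))
    rw [hstep, ih dp1 (by rw [hdp1, pvStep2, length_pvS]; omega)
      (fun k hk => by rw [hrow1]; exact hrows k (by rw [← length_pvS dp (m+1) 0, ← pvStep2, ← hdp1]; omega)) i' j']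
    by_cases hc : 1 ≤ i' ∧ i' ≤ m+1 ∧ j' = 0
    · rw [if_pos hc]
      by_cases hi : i' ≤ m
      · rw [if_pos ⟨hc.1, hi, hc.2.2⟩, hG1, hG1,
          if_neg (by omega), if_neg (by omega)]
      · have hi' : i' = m+1 := by omega
        rw [if_neg (by omega), hG1, if_pos ⟨hi', hc.2.2⟩, hi']
        norm_num
    · rw [if_neg hc, if_neg (by intro h; exact hc ⟨h.1, by omega, h.2.2⟩),
        hG1, if_neg (by intro h; exact hc ⟨by omega, by omega, h.2⟩)]

theorem pass3_char : ∀ (n : Nat) (dp : List (List Int)),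
    0 < dp.length → n < (dp.getD 0 []).length → ∀ i' j',
    pvG (pvPass3 dp n) i' j' =
      if i' = 0 ∧ 1 ≤ j' ∧ j' ≤ n then pvG dp 0 j' - pvG dp 0 (j'-1) else pvG dp i' j' := by
  intro n
  induction n with
  | zero =>
    intro dp _ _ i' j'
    rw [if_neg (by omega)]
    rfl
  | succ n ih =>
    intro dp hd hn i' j'
    have hstep : pvPass3 dp (n+1) = pvPass3 (pvStep3 dp (n+1)) n := by
      unfold pvPass3
      rw [range'_reverse_succ]
      rfl
    set dp1 := pvStep3 dp (n+1) with hdp1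
    have hrow1 : ∀ k, ((dp1.getD k []).length) = ((dp.getD k []).length) := by
      intro k; rw [hdp1, pvStep3, rowlen_pvS]
    have hG1 : ∀ a b, pvG dp1 a b =
        if a = 0 ∧ b = n+1 then pvG dp 0 (n+1) - pvG dp 0 n else pvG dp a b := by
      intro a b
      rw [hdp1, pvStep3]
      exact pvG_pvS dp 0 (n+1) _ a b hd hn
    rw [hstep, ih dp1 (by rw [hdp1, pvStep3, length_pvS]; omega) (by rw [hrow1]; omega) i' j']
    by_cases hc : i' = 0 ∧ 1 ≤ j' ∧ j' ≤ n+1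
    · rw [if_pos hc]
      by_cases hj : j' ≤ n
      · rw [if_pos ⟨hc.1, hc.2.1, hj⟩, hG1, hG1,
          if_neg (by omega), if_neg (by omega)]
      · have hj' : j' = n+1 := by omega
        rw [if_neg (by omega), hG1, if_pos ⟨hc.1, hj'⟩, hj']
        norm_num
    · rw [if_neg hc, if_neg (by intro h; exact hc ⟨h.1, h.2.1, by omega⟩),
        hG1, if_neg (by intro h; exact hc ⟨h.1, by omega, by omega⟩)]

theorem pvRow_eq (m : List (List Int)) (i : Nat) (hi : i < m.length) :
    m.getD i [] = m[i] := by
  rw [List.getD_eq_getElem?_getD, List.getElem?_eq_getElem hi]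
  rfl

theorem pvG_eq_getElem (m : List (List Int)) (i j : Nat)
    (hi : i < m.length) (hj : j < (m[i]).length) :
    pvG m i j = m[i][j] := by
  rw [pvG, pvRow_eq m i hi, List.getD_eq_getElem?_getD, List.getElem?_eq_getElem hj]
  rfl

-- ===== VERDICT (by name: the statement is the Claim_ definition above) =====
theorem matrix_conversion_spec : Claim_equal_matrix_conversion := by
  intro M hDom hPre
  unfold Spec_matrix_conversion
  by_cases hM : M.isEmpty
  · simp [matrix_conversion, matrix_conversion_alt, hM]
  · have hM' : M.isEmpty = false := by simpa using hM
    have hr : 0 < M.length := by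
      cases M with
      | nil => simp at hM'
      | cons a l => simp
    obtain ⟨hrows, hor⟩ := hPre
    set w := (M.headD []).length with hw
    by_cases hw0 : w = 0
    · -- only the single empty row survives Pre_ here: M = [[]]
      have hr1 : M.length = 1 := by
        rcases hor with h | h
        · omega
        · omega
      have hM0 : M = [[]] := by
        cases M with
        | nil => simp at hr
        | cons a l =>
          cases l with
          | nil =>
            have : a.length = 0 := by simpa [hw] using hw0
            simp [List.eq_nil_of_length_eq_zero this]
          | cons b t => simp at hr1
      subst hM0
      decide
    · have hw1 : 1 ≤ w := by omega
      have hrowlen : ∀ k, k < M.length → w ≤ (M.getD k []).length := by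
        intro k hk
        exact hrows (M.getD k []) (by rw [pvRow_eq M k hk]; exact List.getElem_mem hk)
      have hrow0 : (M.getD 0 []).length = w := by
        cases M with
        | nil => simp at hr
        | cons a l => simp [hw]
      set O := pvOuter M (M.length - 1) (w - 1) with hO
      set P2 := pvPass2 O (M.length - 1) with hP2
      set F3 := pvPass3 P2 (w - 1) with hF3
      have hform : matrix_conversion M = F3 := by
        rw [matrix_conversion, if_neg (by simp [hM'])]
      have shO : pvShape M O := pvShape_outer M M _ _ ⟨rfl, fun _ => rfl⟩
      have shP2 : pvShape M P2 := pvShape_pass2 M O _ shO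
      have shF3 : pvShape M F3 := pvShape_pass3 M P2 _ shP2
      -- characterisations of the three passes
      have cO : ∀ a b, pvG O a b =
          if 1 ≤ a ∧ a ≤ M.length - 1 ∧ 1 ≤ b ∧ b ≤ w - 1 then pvF M a b else pvG M a b :=
        outer_char (M.length - 1) M (w - 1) (by omega)
          (fun k hk => by have := hrowlen k hk; omega)
      have cP2 : ∀ a b, pvG P2 a b =
          if 1 ≤ a ∧ a ≤ M.length - 1 ∧ b = 0 then pvG O a 0 - pvG O (a-1) 0 else pvG O a b :=
        pass2_char (M.length - 1) O (by rw [shO.1]; omega)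
          (fun k hk => by
            rw [shO.2]
            have := hrowlen k (by rw [← shO.1]; omega)
            omega)
      have cF3 : ∀ a b, pvG F3 a b =
          if a = 0 ∧ 1 ≤ b ∧ b ≤ w - 1 then pvG P2 0 b - pvG P2 0 (b-1) else pvG P2 a b :=
        pass3_char (w - 1) P2 (by rw [shP2.1]; omega) (by rw [shP2.2, hrow0]; omega)
      -- the combined closed form of A's final matrix
      have hfin : ∀ a b, a < M.length → pvG F3 a b = pvG M a b
            - (if 1 ≤ b ∧ b < w then pvG M a (b-1) else 0)
            - (if 1 ≤ a ∧ b < w then pvG M (a-1) b else 0)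
            + (if 1 ≤ a ∧ 1 ≤ b ∧ b < w then pvG M (a-1) (b-1) else 0) := by
        intro a b ha2
        rw [cF3]
        by_cases ha : a = 0
        · subst ha
          by_cases hb : 1 ≤ b ∧ b ≤ w - 1
          · rw [if_pos ⟨rfl, hb⟩, cP2, cP2, if_neg (by omega), if_neg (by omega),
              cO, cO, if_neg (by omega), if_neg (by omega),
              if_pos (by omega), if_neg (by omega), if_neg (by omega)]
            ring
          · rw [if_neg (by omega), cP2, if_neg (by omega), cO, if_neg (by omega),
              if_neg (by omega), if_neg (by omega), if_neg (by omega)]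
            ring
        · by_cases hb0 : b = 0
          · subst hb0
            rw [if_neg (by omega), cP2, if_pos (by omega), cO, cO,
              if_neg (by omega), if_neg (by omega),
              if_neg (by omega), if_pos (by omega), if_neg (by omega)]
            ring
          · by_cases hin : 1 ≤ b ∧ b ≤ w - 1
            · rw [if_neg (by omega), cP2, if_neg (by omega), cO, if_pos (by omega),
                if_pos (by omega), if_pos (by omega), if_pos (by omega)]
              unfold pvF
              ring
            · rw [if_neg (by omega), cP2, if_neg (by omega), cO, if_neg (by omega)]
              rw [if_neg (by omega), if_neg (by omega), if_neg (by omega)]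
              ring
      -- now compare with B entry by entry
      rw [hform, matrix_conversion_alt, if_neg (by simp [hM'])]
      apply List.ext_getElem
      · simp [shF3.1, PySem.List.length_enumerate]
      · intro i hi1 hi2
        have hiM : i < M.length := by rw [← shF3.1]; exact hi1
        rw [List.getElem_map, PySem.List.getElem_enumerate]
        apply List.ext_getElem
        · have : (F3.getD i []).length = (M.getD i []).length := shF3.2 i
          rw [pvRow_eq F3 i hi1, pvRow_eq M i hiM] at this
          simp [this, PySem.List.length_enumerate]
        · intro j hj1 hj2
          have hjM : j < (M[i]).length := by
            have : (F3.getD i []).length = (M.getD i []).length := shF3.2 i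
            rw [pvRow_eq F3 i hi1, pvRow_eq M i hiM] at this
            omega
          rw [List.getElem_map, PySem.List.getElem_enumerate]
          rw [← pvG_eq_getElem F3 i j hi1 hj1, hfin i j hiM,
            pvG_eq_getElem M i j hiM hjM]
          simp only [zero_add]
          -- align the four guarded neighbour terms
          congr 1
          · congr 1
            · congr 1
              by_cases hg : 1 ≤ j ∧ j < w
              · rw [if_pos (by omega), if_pos (by constructor <;> [omega; exact_mod_cast (by omega : (j:Int) < (w:Int))])]
                have hcast : ((j : Int) - 1) = (((j - 1 : Nat)) : Int) := by omega
                rw [hcast, PySem.List.pyGetD_natCast, pvG, pvRow_eq M i hiM]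
              · rw [if_neg (by omega), if_neg (by
                  intro hcon
                  have h1 : 1 ≤ j := by exact_mod_cast hcon.1
                  have h2 : j < w := by exact_mod_cast hcon.2
                  omega)]
            · by_cases hg : 1 ≤ i ∧ j < w
              · rw [if_pos (by omega), if_pos (by
                  constructor
                  · exact_mod_cast (by omega : (0:Int) < (i:Int))
                  · exact_mod_cast (by omega : (j:Int) < (w:Int)))]
                have hcast : ((i : Int) - 1) = (((i - 1 : Nat)) : Int) := by omega
                rw [hcast, PySem.List.pyGetD_natCast, PySem.List.pyGetD_natCast, pvG]
              · rw [if_neg (by omega), if_neg (by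
                  intro hcon
                  have h1 : 1 ≤ i := by exact_mod_cast hcon.1
                  have h2 : j < w := by exact_mod_cast hcon.2
                  omega)]
          · by_cases hg : 1 ≤ i ∧ 1 ≤ j ∧ j < w
            · rw [if_pos (by omega), if_pos (by
                refine ⟨?_, ?_, ?_⟩
                · exact_mod_cast (by omega : (0:Int) < (i:Int))
                · exact_mod_cast (by omega : (0:Int) < (j:Int))
                · exact_mod_cast (by omega : (j:Int) < (w:Int)))]
              have hci : ((i : Int) - 1) = (((i - 1 : Nat)) : Int) := by omega
              have hcj : ((j : Int) - 1) = (((j - 1 : Nat)) : Int) := by omega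
              rw [hci, hcj, PySem.List.pyGetD_natCast, PySem.List.pyGetD_natCast, pvG]
            · rw [if_neg (by omega), if_neg (by
                intro hcon
                have h1 : 1 ≤ i := by exact_mod_cast hcon.1
                have h2 : 1 ≤ j := by exact_mod_cast hcon.2.1
                have h3 : j < w := by exact_mod_cast hcon.2.2
                omega)]
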